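-- pv_equiv track=rewrite | github.com/ayoubzulfiqar/Leetcode-Medium | FindthePowerofK-SizeSubarraysII/find_the_power_of_k-size_subarrays_ii.py | findPowerOfKSizeSubarrays
-- ===== SOURCE A (Python) =====
-- def findPowerOfKSizeSubarrays(nums: list[int], k: int) -> list[int]:
--     n = len(nums)
--     results = []
--
--     if k == 1:
--         return nums[:]
--
--     is_consecutive_flags = [False] * (n - 1)
--     for j in range(n - 1):
--         if nums[j+1] == nums[j] + 1:
--             is_consecutive_flags[j] = True
--
--     bad_pairs_count = 0
--     for j in range(k - 1):
--         if not is_consecutive_flags[j]: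
--             bad_pairs_count += 1
--
--     if bad_pairs_count == 0:
--         results.append(nums[k-1])
--     else:
--         results.append(-1)
--
--     for i in range(1, n - k + 1):
--         if not is_consecutive_flags[i-1]:
--             bad_pairs_count -= 1
--
--         if not is_consecutive_flags[i+k-2]:
--             bad_pairs_count += 1
--
--         if bad_pairs_count == 0:
--             results.append(nums[i+k-1])
--         else:
--             results.append(-1)
--
--     return results
-- ===== SOURCE B (Python) =====
-- def findPowerOfKSizeSubarrays(nums: list[int], k: int) -> list[int]:
--     n = len(nums)
--     if k == 1:
--         return nums[:]
--     # bad[j] = number of non-consecutive adjacent pairs among the first j elements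
--     bad = [0]
--     c = 0
--     for j in range(n - 1):
--         c += 0 if nums[j + 1] == nums[j] + 1 else 1
--         bad.append(c)
--     # answer for the window ending at e, for every position, then drop the warm-up
--     return [nums[e] if bad[e] == bad[e - k + 1] else -1 for e in range(n)][k - 1:]
-- ===== Notes on version B (the rewrite author's own statement) =====
-- stated objective: alternative
-- what changed: Replaces A's sliding bad-pair counter (flag array, seeded count, incremental add/remove per window) by a one-pass prefix count of non-consecutive pairs, answering every window with a single prefix-difference check and slicing off the k-1 warm-up positions.
import Mathlib
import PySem

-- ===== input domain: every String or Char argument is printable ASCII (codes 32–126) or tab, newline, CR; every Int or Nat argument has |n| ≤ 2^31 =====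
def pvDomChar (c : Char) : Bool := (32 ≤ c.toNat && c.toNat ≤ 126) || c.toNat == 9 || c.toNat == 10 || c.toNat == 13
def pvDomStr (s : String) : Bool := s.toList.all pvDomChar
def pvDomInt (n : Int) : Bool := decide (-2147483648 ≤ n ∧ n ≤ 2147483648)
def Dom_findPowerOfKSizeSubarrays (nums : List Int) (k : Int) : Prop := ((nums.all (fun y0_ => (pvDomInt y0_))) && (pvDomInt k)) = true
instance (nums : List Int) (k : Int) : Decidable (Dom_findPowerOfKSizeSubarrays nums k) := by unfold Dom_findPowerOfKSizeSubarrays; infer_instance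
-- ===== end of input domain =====

-- B replaces A's sliding bad-pair counter (flag array, seeded count, incremental
-- add/remove per window) by a prefix count of non-consecutive pairs, answering each
-- window with one O(1) difference check (objective: alternative). Return values agree
-- on Pre_; outside it A raises IndexError.

-- ===== PORT A =====
def findPowerOfKSizeSubarrays (nums : List Int) (k : Int) : List Int :=
  let n : Int := (nums.length : Int)
  let results : List Int := []
  if k = 1 then
    nums
  else
    let flags0 : List Bool := List.replicate (n - 1).toNat false
    let flags : List Bool :=
      (PySem.List.pyRange 0 (n - 1) 1).foldl
        (fun fl j =>
          if PySem.List.pyGetD nums (j + 1) 0 = PySem.List.pyGetD nums j 0 + 1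
          then fl.set j.toNat true else fl) flags0
    let bad0 : Int :=
      (PySem.List.pyRange 0 (k - 1) 1).foldl
        (fun c j => if !(PySem.List.pyGetD flags j false) then c + 1 else c) 0
    let results := results ++ [if bad0 = 0 then PySem.List.pyGetD nums (k - 1) 0 else -1]
    let st :=
      (PySem.List.pyRange 1 (n - k + 1) 1).foldl
        (fun (st : Int × List Int) i =>
          let bad1 := if !(PySem.List.pyGetD flags (i - 1) false) then st.1 - 1 else st.1
          let bad2 := if !(PySem.List.pyGetD flags (i + k - 2) false) then bad1 + 1 else bad1
          (bad2, st.2 ++ [if bad2 = 0 then PySem.List.pyGetD nums (i + k - 1) 0 else -1]))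
        (bad0, results)
    st.2

-- ===== PORT B =====
def findPowerOfKSizeSubarrays_alt (nums : List Int) (k : Int) : List Int :=
  let n : Int := (nums.length : Int)
  if k = 1 then
    nums
  else
    let st :=
      (PySem.List.pyRange 0 (n - 1) 1).foldl
        (fun (st : List Int × Int) j =>
          let c := st.2 + (if PySem.List.pyGetD nums (j + 1) 0 = PySem.List.pyGetD nums j 0 + 1
            then 0 else 1)
          (st.1 ++ [c], c))
        ([0], 0)
    PySem.List.slice
      ((PySem.List.pyRange 0 n 1).map
        (fun e => if PySem.List.pyGetD st.1 e 0 = PySem.List.pyGetD st.1 (e - k + 1) 0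
          then PySem.List.pyGetD nums e 0 else -1))
      (some (k - 1)) none

-- ===== PRECONDITION & SPEC =====
-- Pre_ admits exactly the inputs where the Python A returns normally: k = 1, or
-- 1 ≤ k ≤ len(nums). Everywhere else A raises IndexError (flag-array or nums[-1]
-- access out of range), while B's own prefix-table indexing raises IndexError on
-- almost all of those inputs too (it returns [] for k = len(nums) + 1 and on empty input).
def Pre_findPowerOfKSizeSubarrays (nums : List Int) (k : Int) : Prop :=
  k = 1 ∨ (1 ≤ k ∧ k ≤ (nums.length : Int))
instance (nums : List Int) (k : Int) : Decidable (Pre_findPowerOfKSizeSubarrays nums k) := by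
  unfold Pre_findPowerOfKSizeSubarrays; infer_instance

def pvWitness_findPowerOfKSizeSubarrays : List Int × Int := ([3, 4, 5, 7], 3)

def Spec_findPowerOfKSizeSubarrays (nums : List Int) (k : Int) (out : List Int) : Prop := out = findPowerOfKSizeSubarrays_alt nums k
instance (nums : List Int) (k : Int) (out : List Int) : Decidable (Spec_findPowerOfKSizeSubarrays nums k out) := by unfold Spec_findPowerOfKSizeSubarrays; infer_instance

-- ===== CLAIM (what is proved, stated in full; the proofs are below) =====
def Claim_equal_findPowerOfKSizeSubarrays : Prop := ∀ (nums : List Int) (k : Int), Dom_findPowerOfKSizeSubarrays nums k → Pre_findPowerOfKSizeSubarrays nums k → Spec_findPowerOfKSizeSubarrays nums k (findPowerOfKSizeSubarrays nums k)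

-- ===== LEMMAS AND PROOFS =====

-- Proof-side abstractions (Nat-indexed): the consecutive-pair flag, the count of bad
-- pairs in an index interval, and the length of the +1 run ending at an index.
def pvFlag (nums : List Int) (j : Nat) : Bool := nums.getD (j + 1) 0 == nums.getD j 0 + 1

def pvBad (nums : List Int) (a b : Nat) : Nat :=
  ((List.range' a (b - a)).filter (fun j => !pvFlag nums j)).length

def pvAnsA (nums : List Int) (k : Nat) (i : Nat) : Int :=
  if pvBad nums i (i + k - 1) = 0 then nums.getD (i + k - 1) 0 else -1

-- the set-building loop over a replicate-false array produces the map of the condition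
lemma pvBuild_aux (c : Nat → Bool) : ∀ (L : List Nat) (init t : List Bool),
    (∀ j ∈ L, j < init.length) →
    L.foldl (fun fl j => if c j then fl.set j true else fl) (init ++ t)
      = (L.foldl (fun fl j => if c j then fl.set j true else fl) init) ++ t := by
  intro L
  induction L with
  | nil => intro init t _; rfl
  | cons j L ih =>
    intro init t h
    have hj : j < init.length := h j (by simp)
    simp only [List.foldl_cons]
    by_cases hc : c j
    · rw [if_pos hc, if_pos hc, List.set_append, if_pos hj]
      exact ih (init.set j true) t (by intro x hx; simpa using h x (by simp [hx]))
    · rw [if_neg hc, if_neg hc]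
      exact ih init t (fun x hx => h x (by simp [hx]))

lemma pvBuild (c : Nat → Bool) : ∀ (m : Nat),
    (List.range m).foldl (fun fl j => if c j then fl.set j true else fl)
      (List.replicate m false) = (List.range m).map c := by
  intro m
  induction m with
  | zero => rfl
  | succ m ih =>
    rw [List.range_succ, List.replicate_succ', List.foldl_append,
      pvBuild_aux c (List.range m) _ [false] (by intro j hj; simpa using List.mem_range.mp hj),
      ih]
    simp only [List.foldl_cons, List.foldl_nil, List.map_append, List.map_cons, List.map_nil]
    by_cases hc : c m
    · rw [if_pos hc, List.set_append, if_neg (by simp), hc]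
      simp
    · rw [if_neg hc]
      have hcm : c m = false := by simpa using hc
      simp [hcm]

lemma pvCount (p : Nat → Bool) : ∀ (L : List Nat) (c : Int),
    L.foldl (fun c j => if p j then c + 1 else c) c = c + ((L.filter p).length : Int) := by
  intro L
  induction L with
  | nil => intro c; simp
  | cons j L ih =>
    intro c
    simp only [List.foldl_cons, List.filter_cons]
    by_cases hp : p j
    · rw [if_pos hp, if_pos hp, ih]
      simp only [List.length_cons]
      push_cast; omega
    · rw [if_neg hp, if_neg hp, ih]


lemma pvFlags_eq (nums : List Int) :
    (PySem.List.pyRange 0 ((nums.length : Int) - 1) 1).foldl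
        (fun fl j => if PySem.List.pyGetD nums (j + 1) 0 = PySem.List.pyGetD nums j 0 + 1
          then fl.set j.toNat true else fl)
        (List.replicate ((nums.length : Int) - 1).toNat false)
      = (List.range (nums.length - 1)).map (pvFlag nums) := by
  rw [PySem.List.pyRange_one, List.foldl_map]
  have h1 : ((nums.length : Int) - 1 - 0).toNat = nums.length - 1 := by omega
  have h2 : ((nums.length : Int) - 1).toNat = nums.length - 1 := by omega
  rw [h1, h2, ← pvBuild (pvFlag nums) (nums.length - 1)]
  apply PySem.List.foldl_congr_mem
  intro acc x _
  simp only [zero_add]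
  have e1 : ((x : Nat) : Int) + 1 = ((x + 1 : Nat) : Int) := by omega
  rw [e1, PySem.List.pyGetD_natCast, PySem.List.pyGetD_natCast, Int.toNat_natCast]
  by_cases hc : nums.getD (x + 1) 0 = nums.getD x 0 + 1
  · rw [if_pos hc, if_pos (by simp only [pvFlag, beq_iff_eq]; exact hc)]
  · rw [if_neg hc, if_neg (by simp only [pvFlag, beq_iff_eq]; exact hc)]

lemma pvBad0_eq (nums : List Int) (k : Int) (h2 : 2 ≤ k) (hn : k ≤ (nums.length : Int)) :
    (PySem.List.pyRange 0 (k - 1) 1).foldl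
        (fun c j => if !(PySem.List.pyGetD ((List.range (nums.length - 1)).map (pvFlag nums)) j false)
          then c + 1 else c) 0
      = (pvBad nums 0 (k.toNat - 1) : Int) := by
  rw [PySem.List.pyRange_one, List.foldl_map]
  have h1 : (k - 1 - 0).toNat = k.toNat - 1 := by omega
  rw [h1]
  rw [PySem.List.foldl_congr_mem (List.range (k.toNat - 1)) _
    (fun c (jn : Nat) => if !pvFlag nums jn then c + 1 else c) 0 ?_]
  · rw [pvCount]
    unfold pvBad
    rw [List.range_eq_range']
    simp
  · intro acc x hx
    have hx' : x < k.toNat - 1 := List.mem_range.mp hx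
    simp only [zero_add]
    rw [PySem.List.pyGetD_natCast, PySem.List.getD_map_range _ _ _ _ (by omega)]

lemma pvBad_split_left (nums : List Int) (t k : Nat) (h2 : 2 ≤ k) :
    pvBad nums t (t + k - 1)
      = (if !pvFlag nums t then 1 else 0) + pvBad nums (t + 1) (t + k - 1) := by
  unfold pvBad
  have e1 : t + k - 1 - t = (k - 2) + 1 := by omega
  have e2 : t + k - 1 - (t + 1) = k - 2 := by omega
  rw [e1, e2, List.range'_succ, List.filter_cons]
  rcases Bool.eq_false_or_eq_true (pvFlag nums t) with hf | hf <;> simp [hf] <;> omega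


lemma pvBad_split_right (nums : List Int) (t k : Nat) (h2 : 2 ≤ k) :
    pvBad nums (t + 1) (t + k)
      = pvBad nums (t + 1) (t + k - 1) + (if !pvFlag nums (t + k - 1) then 1 else 0) := by
  unfold pvBad
  have e1 : t + k - (t + 1) = (k - 2) + 1 := by omega
  have e2 : t + k - 1 - (t + 1) = k - 2 := by omega
  have e3 : (t + 1) + 1 * (k - 2) = t + k - 1 := by omega
  rw [e1, e2, List.range'_concat, e3, List.filter_append, List.length_append]
  rcases Bool.eq_false_or_eq_true (pvFlag nums (t + k - 1)) with hf | hf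
  · simp [hf]
  · simp [hf]

lemma pvA_loop (nums : List Int) (k : Int) (h2 : 2 ≤ k) (hn : k ≤ (nums.length : Int)) :
    ∀ (t : Nat), t ≤ nums.length - k.toNat →
    ((List.range t).map (fun x => (1 : Int) + ↑x)).foldl
        (fun (st : Int × List Int) i =>
          let bad1 := if !(PySem.List.pyGetD ((List.range (nums.length - 1)).map (pvFlag nums)) (i - 1) false) then st.1 - 1 else st.1
          let bad2 := if !(PySem.List.pyGetD ((List.range (nums.length - 1)).map (pvFlag nums)) (i + k - 2) false) then bad1 + 1 else bad1
          (bad2, st.2 ++ [if bad2 = 0 then PySem.List.pyGetD nums (i + k - 1) 0 else -1]))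
        ((pvBad nums 0 (k.toNat - 1) : Int), [pvAnsA nums k.toNat 0])
      = ((pvBad nums t (t + k.toNat - 1) : Int), (List.range' 0 (t + 1)).map (pvAnsA nums k.toNat)) := by
  intro t
  induction t with
  | zero =>
    intro _
    simp [List.range'_one]
  | succ t ih =>
    intro ht
    rw [List.range_succ, List.map_append, List.foldl_append, ih (by omega)]
    simp only [List.map_cons, List.map_nil, List.foldl_cons, List.foldl_nil]
    have hidx1 : (1 : Int) + ↑t - 1 = ((t : Nat) : Int) := by omega
    have hidx2 : (1 : Int) + ↑t + k - 2 = ((t + k.toNat - 1 : Nat) : Int) := by omega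
    have hidx3 : (1 : Int) + ↑t + k - 1 = ((t + k.toNat : Nat) : Int) := by omega
    rw [hidx1, hidx2, hidx3, PySem.List.pyGetD_natCast, PySem.List.pyGetD_natCast,
      PySem.List.pyGetD_natCast,
      PySem.List.getD_map_range _ _ _ _ (by omega : t < nums.length - 1),
      PySem.List.getD_map_range _ _ _ _ (by omega : t + k.toNat - 1 < nums.length - 1)]
    have hL := pvBad_split_left nums t k.toNat (by omega)
    have hR := pvBad_split_right nums t k.toNat (by omega)
    have hbad2 :
        (if !pvFlag nums (t + k.toNat - 1)
          then (if !pvFlag nums t then (pvBad nums t (t + k.toNat - 1) : Int) - 1 else (pvBad nums t (t + k.toNat - 1) : Int)) + 1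
          else (if !pvFlag nums t then (pvBad nums t (t + k.toNat - 1) : Int) - 1 else (pvBad nums t (t + k.toNat - 1) : Int)))
          = (pvBad nums (t + 1) (t + k.toNat) : Int) := by
      rcases Bool.eq_false_or_eq_true (pvFlag nums t) with hf1 | hf1 <;>
      rcases Bool.eq_false_or_eq_true (pvFlag nums (t + k.toNat - 1)) with hf2 | hf2 <;>
      simp [hf1, hf2] at hL hR ⊢ <;> omega
    rw [hbad2]
    have hend : t + 1 + k.toNat - 1 = t + k.toNat := by omega
    rw [hend]
    have hans : (if (pvBad nums (t + 1) (t + k.toNat) : Int) = 0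
        then nums.getD (t + k.toNat) 0 else -1) = pvAnsA nums k.toNat (t + 1) := by
      unfold pvAnsA
      rw [hend]
      by_cases hz : pvBad nums (t + 1) (t + k.toNat) = 0
      · rw [if_pos (by exact_mod_cast hz), if_pos hz]
      · rw [if_neg (by exact_mod_cast hz), if_neg hz]
    rw [hans]
    have hconcat : List.range' 0 (t + 1 + 1) = List.range' 0 (t + 1) ++ [t + 1] := by
      rw [List.range'_concat]
      norm_num
    rw [hconcat, List.map_append]
    simp

-- A computes the window answers in order
lemma pvA_char (nums : List Int) (k : Int) (h2 : 2 ≤ k) (hn : k ≤ (nums.length : Int)) :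
    findPowerOfKSizeSubarrays nums k
      = (List.range (nums.length - k.toNat + 1)).map (pvAnsA nums k.toNat) := by
  have hk1 : k ≠ 1 := by omega
  unfold findPowerOfKSizeSubarrays
  rw [if_neg hk1]
  show ((PySem.List.pyRange 1 ((nums.length : Int) - k + 1) 1).foldl
      (fun (st : Int × List Int) i =>
        let bad1 := if !(PySem.List.pyGetD
            ((PySem.List.pyRange 0 ((nums.length : Int) - 1) 1).foldl
              (fun fl j => if PySem.List.pyGetD nums (j + 1) 0 = PySem.List.pyGetD nums j 0 + 1
                then fl.set j.toNat true else fl)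
              (List.replicate ((nums.length : Int) - 1).toNat false)) (i - 1) false)
          then st.1 - 1 else st.1
        let bad2 := if !(PySem.List.pyGetD
            ((PySem.List.pyRange 0 ((nums.length : Int) - 1) 1).foldl
              (fun fl j => if PySem.List.pyGetD nums (j + 1) 0 = PySem.List.pyGetD nums j 0 + 1
                then fl.set j.toNat true else fl)
              (List.replicate ((nums.length : Int) - 1).toNat false)) (i + k - 2) false)
          then bad1 + 1 else bad1
        (bad2, st.2 ++ [if bad2 = 0 then PySem.List.pyGetD nums (i + k - 1) 0 else -1]))
      (((PySem.List.pyRange 0 (k - 1) 1).foldl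
          (fun c j => if !(PySem.List.pyGetD
              ((PySem.List.pyRange 0 ((nums.length : Int) - 1) 1).foldl
                (fun fl j => if PySem.List.pyGetD nums (j + 1) 0 = PySem.List.pyGetD nums j 0 + 1
                  then fl.set j.toNat true else fl)
                (List.replicate ((nums.length : Int) - 1).toNat false)) j false)
            then c + 1 else c) 0),
        [] ++ [if ((PySem.List.pyRange 0 (k - 1) 1).foldl
          (fun c j => if !(PySem.List.pyGetD
              ((PySem.List.pyRange 0 ((nums.length : Int) - 1) 1).foldl
                (fun fl j => if PySem.List.pyGetD nums (j + 1) 0 = PySem.List.pyGetD nums j 0 + 1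
                  then fl.set j.toNat true else fl)
                (List.replicate ((nums.length : Int) - 1).toNat false)) j false)
            then c + 1 else c) 0) = 0 then PySem.List.pyGetD nums (k - 1) 0 else -1])).2
    = (List.range (nums.length - k.toNat + 1)).map (pvAnsA nums k.toNat)
  simp only [pvFlags_eq, pvBad0_eq nums k h2 hn, List.nil_append]
  have hfst : (if (pvBad nums 0 (k.toNat - 1) : Int) = 0
      then PySem.List.pyGetD nums (k - 1) 0 else -1) = pvAnsA nums k.toNat 0 := by
    have e1 : k - 1 = ((k.toNat - 1 : Nat) : Int) := by omega
    rw [e1, PySem.List.pyGetD_natCast]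
    unfold pvAnsA
    have e2 : 0 + k.toNat - 1 = k.toNat - 1 := by omega
    rw [e2]
    by_cases hz : pvBad nums 0 (k.toNat - 1) = 0
    · rw [if_pos (by exact_mod_cast hz), if_pos hz]
    · rw [if_neg (by exact_mod_cast hz), if_neg hz]
  rw [hfst]
  rw [PySem.List.pyRange_one]
  have h3 : ((nums.length : Int) - k + 1 - 1).toNat = nums.length - k.toNat := by omega
  rw [h3]
  have hmap : (List.map (fun x => (1 : Int) + ↑x) (List.range (nums.length - k.toNat))) =
      ((List.range (nums.length - k.toNat)).map (fun x => (1 : Int) + ↑x)) := rfl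
  rw [hmap, pvA_loop nums k h2 hn (nums.length - k.toNat) (le_refl _)]
  rw [← List.range_eq_range']


-- prefix count of bad pairs
def pvPref (nums : List Int) (j : Nat) : Nat := pvBad nums 0 j

lemma pvPref_succ (nums : List Int) (j : Nat) :
    pvPref nums (j + 1) = pvPref nums j + (if pvFlag nums j then 0 else 1) := by
  unfold pvPref pvBad
  have e1 : j + 1 - 0 = j + 1 := by omega
  have e2 : j - 0 = j := by omega
  rw [e1, e2, List.range'_concat]
  have e3 : 0 + 1 * j = j := by omega
  rw [e3, List.filter_append, List.length_append]
  rcases Bool.eq_false_or_eq_true (pvFlag nums j) with hf | hf <;> simp [hf]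

lemma pvBad_prefix (nums : List Int) (i e : Nat) (h : i ≤ e) :
    pvPref nums e = pvPref nums i + pvBad nums i e := by
  unfold pvPref pvBad
  have e1 : e - 0 = i + (e - i) := by omega
  have e2 : i - 0 = i := by omega
  rw [e1, e2, ← List.range'_append]
  simp

lemma pvBuildPref (nums : List Int) : ∀ (m : Nat),
    ((List.range m).map (fun x => ((0 : Int) + ↑x))).foldl
        (fun (st : List Int × Int) j =>
          let c := st.2 + (if PySem.List.pyGetD nums (j + 1) 0 = PySem.List.pyGetD nums j 0 + 1
            then 0 else 1)
          (st.1 ++ [c], c))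
        ([0], 0)
      = ((List.range (m + 1)).map (fun j => (pvPref nums j : Int)), (pvPref nums m : Int)) := by
  intro m
  induction m with
  | zero => rfl
  | succ m ih =>
    rw [List.range_succ, List.map_append, List.foldl_append, ih]
    simp only [List.map_cons, List.map_nil, List.foldl_cons, List.foldl_nil]
    have e1 : ((0 : Int) + ↑m) + 1 = ((m + 1 : Nat) : Int) := by omega
    have e2 : ((0 : Int) + ↑m) = ((m : Nat) : Int) := by omega
    rw [e1, e2, PySem.List.pyGetD_natCast, PySem.List.pyGetD_natCast]
    have hc : ((pvPref nums m : Nat) : Int)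
          + (if nums.getD (m + 1) 0 = nums.getD m 0 + 1 then 0 else 1)
        = ((pvPref nums (m + 1) : Nat) : Int) := by
      rw [pvPref_succ]
      by_cases hf : nums.getD (m + 1) 0 = nums.getD m 0 + 1
      · rw [if_pos hf, if_pos (by simp only [pvFlag, beq_iff_eq]; exact hf)]
        push_cast; ring
      · rw [if_neg hf, if_neg (by simp only [pvFlag, beq_iff_eq]; exact hf)]
        push_cast; ring
    rw [hc]
    have hr : List.range (m + 1 + 1) = List.range (m + 1) ++ [m + 1] := List.range_succ
    rw [hr, List.map_append]
    simp

lemma pvDropRange (m n : Nat) : (List.range n).drop m = List.range' m (n - m) := by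
  rw [List.range_eq_range', List.drop_range']
  norm_num

-- B computes the same window answers
lemma pvB_char (nums : List Int) (k : Int) (h2 : 2 ≤ k) (hn : k ≤ (nums.length : Int)) :
    findPowerOfKSizeSubarrays_alt nums k
      = (List.range (nums.length - k.toNat + 1)).map (pvAnsA nums k.toNat) := by
  have hk1 : k ≠ 1 := by omega
  unfold findPowerOfKSizeSubarrays_alt
  rw [if_neg hk1]
  show PySem.List.slice
      ((PySem.List.pyRange 0 (nums.length : Int) 1).map
        (fun e =>
          if PySem.List.pyGetD
              ((PySem.List.pyRange 0 ((nums.length : Int) - 1) 1).foldl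
                (fun (st : List Int × Int) j =>
                  let c := st.2 + (if PySem.List.pyGetD nums (j + 1) 0 = PySem.List.pyGetD nums j 0 + 1
                    then 0 else 1)
                  (st.1 ++ [c], c))
                ([0], 0)).1 e 0
            = PySem.List.pyGetD
              ((PySem.List.pyRange 0 ((nums.length : Int) - 1) 1).foldl
                (fun (st : List Int × Int) j =>
                  let c := st.2 + (if PySem.List.pyGetD nums (j + 1) 0 = PySem.List.pyGetD nums j 0 + 1
                    then 0 else 1)
                  (st.1 ++ [c], c))
                ([0], 0)).1 (e - k + 1) 0
          then PySem.List.pyGetD nums e 0 else -1))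
      (some (k - 1)) none
    = (List.range (nums.length - k.toNat + 1)).map (pvAnsA nums k.toNat)
  rw [PySem.List.pyRange_one 0 ((nums.length : Int) - 1)]
  have h1 : ((nums.length : Int) - 1 - 0).toNat = nums.length - 1 := by omega
  rw [h1, pvBuildPref nums (nums.length - 1)]
  have h2' : nums.length - 1 + 1 = nums.length := by omega
  rw [h2', PySem.List.slice_from _ (by omega : (0 : Int) ≤ k - 1),
    PySem.List.pyRange_one 0 (nums.length : Int)]
  have h3 : ((nums.length : Int) - 0).toNat = nums.length := by omega
  have h4 : (k - 1).toNat = k.toNat - 1 := by omega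
  rw [h3, h4, List.map_map, ← List.map_drop, pvDropRange]
  have h5 : nums.length - (k.toNat - 1) = nums.length - k.toNat + 1 := by omega
  rw [h5, List.range'_eq_map_range, List.map_map]
  apply List.map_congr_left
  intro i hi
  have hi' : i < nums.length - k.toNat + 1 := List.mem_range.mp hi
  simp only [Function.comp_apply]
  have e1 : (0 : Int) + ((k.toNat - 1 + i : Nat) : Int) = ((k.toNat - 1 + i : Nat) : Int) := by
    omega
  have e2 : ((0 : Int) + ((k.toNat - 1 + i : Nat) : Int)) - k + 1 = ((i : Nat) : Int) := by
    omega
  rw [e2, e1, PySem.List.pyGetD_natCast, PySem.List.pyGetD_natCast, PySem.List.pyGetD_natCast,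
    PySem.List.getD_map_range _ _ _ _ (by omega : k.toNat - 1 + i < nums.length),
    PySem.List.getD_map_range _ _ _ _ (by omega : i < nums.length)]
  have hpre := pvBad_prefix nums i (k.toNat - 1 + i) (by omega)
  have hidx : i + k.toNat - 1 = k.toNat - 1 + i := by omega
  unfold pvAnsA
  rw [hidx]
  by_cases hz : pvBad nums i (k.toNat - 1 + i) = 0
  · rw [if_pos (by rw [Nat.cast_inj]; omega), if_pos hz]
  · rw [if_neg (by rw [Nat.cast_inj]; omega), if_neg hz]

-- ===== VERDICT (by name: the statement is the Claim_ definition above) =====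
theorem findPowerOfKSizeSubarrays_spec : Claim_equal_findPowerOfKSizeSubarrays := by
  intro nums k _ hpre
  unfold Spec_findPowerOfKSizeSubarrays
  by_cases hk1 : k = 1
  · subst hk1
    simp [findPowerOfKSizeSubarrays, findPowerOfKSizeSubarrays_alt]
  · have h2 : 2 ≤ k := by
      rcases hpre with h | ⟨h1, _⟩
      · exact absurd h hk1
      · omega
    have hn : k ≤ (nums.length : Int) := by
      rcases hpre with h | ⟨_, h⟩
      · exact absurd h hk1
      · exact h
    rw [pvA_char nums k h2 hn, pvB_char nums k h2 hn]
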